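-- pv_equiv track=rewrite | github.com/TheGigaChat/Python-challenges | EX/ex08_recursion/recursion.py | x_sum_loop
-- ===== SOURCE A (Python) =====
-- def x_sum_loop(nums: list, x: int) -> int:
--     """
--     Given list 'nums' and a number called 'x' iteratively return sum of every x'th number in the list 'nums'.
--
--     In this task "indexing" starts from 1, so if 'x' = 2 and 'nums' = [2, 3, 4, -9], the output should be -6 (3 + -9).
--     'X' can also be negative, in that case indexing starts from the end of 'nums', see examples below.
--     If 'x' is 0, the sum should be 0 as well.
--
--     :param nums: list of integers
--     :param x: number indicating every which num to add to sum
--     :return: sum of every x'th number in the list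
--     """
--     result_sum = 0
--
--     if x == 0:
--         return 0
--     if x < 0:
--         nums.reverse()
--         x = abs(x)
--
--     for i, num in enumerate(nums):
--         if (i + 1) % x == 0:
--             result_sum += num
--
--     return result_sum
-- ===== SOURCE B (Python) =====
-- def x_sum_loop(nums: list, x: int) -> int:
--     if x == 0:
--         return 0
--     if x < 0:
--         nums.reverse()
--         x = -x
--     total = 0
--     i = x - 1
--     n = len(nums)
--     while i < n:
--         total += nums[i]
--         i += x
--     return total
-- ===== Notes on version B (the rewrite author's own statement) =====
-- stated objective: faster
-- what changed: B strides directly through indices x-1, 2x-1, ... with a while loop instead of enumerating every element and testing (i+1) % x == 0; it touches only about n/x elements and does no modulo arithmetic.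
import Mathlib
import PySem

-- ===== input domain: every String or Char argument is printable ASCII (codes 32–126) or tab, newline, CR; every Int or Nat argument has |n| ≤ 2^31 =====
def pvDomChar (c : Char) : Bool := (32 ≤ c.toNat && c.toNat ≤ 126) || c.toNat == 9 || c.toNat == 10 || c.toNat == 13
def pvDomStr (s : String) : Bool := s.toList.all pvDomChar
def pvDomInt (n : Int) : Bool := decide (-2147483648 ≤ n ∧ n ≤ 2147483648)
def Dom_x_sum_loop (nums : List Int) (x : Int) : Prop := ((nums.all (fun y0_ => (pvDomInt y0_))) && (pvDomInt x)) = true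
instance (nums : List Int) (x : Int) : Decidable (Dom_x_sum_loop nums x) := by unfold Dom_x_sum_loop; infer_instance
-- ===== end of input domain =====

-- B replaces A's enumerate-all-and-test-(i+1)%x scan with a direct stride loop over
-- indices x-1, x-1+x, ...; for x < 0 both A and B mutate the caller's list in place
-- (nums.reverse()) identically, and the theorems below are about the return value.

-- ===== PORT A =====
def x_sum_loop (nums : List Int) (x : Int) : Int :=
  if x = 0 then 0
  else
    let nums := if x < 0 then nums.reverse else nums
    let x := if x < 0 then -x else x
    (PySem.List.enumerate nums 0).foldl
      (fun acc p => if PySem.Int.mod (p.1 + 1) x = 0 then acc + p.2 else acc) 0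

-- ===== PORT B =====
-- the while loop of Source B; `max x 1` only makes the recursion total (every call site has 1 ≤ x)
def bLoop (nums : List Int) (x : Int) (i : Int) (total : Int) : Int :=
  if _h : i < (nums.length : Int) then
    bLoop nums x (i + max x 1) (total + PySem.List.pyGetD nums i 0)
  else total
termination_by ((nums.length : Int) - i).toNat
decreasing_by omega

def x_sum_loop_alt (nums : List Int) (x : Int) : Int :=
  if x = 0 then 0
  else
    let nums := if x < 0 then nums.reverse else nums
    let x := if x < 0 then -x else x
    bLoop nums x (x - 1) 0

-- ===== PRECONDITION & SPEC =====
def Spec_x_sum_loop (nums : List Int) (x : Int) (out : Int) : Prop := out = x_sum_loop_alt nums x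
instance (nums : List Int) (x : Int) (out : Int) : Decidable (Spec_x_sum_loop nums x out) := by unfold Spec_x_sum_loop; infer_instance

-- ===== CLAIM (what is proved, stated in full; the proofs are below) =====
def Claim_equal_x_sum_loop : Prop := ∀ (nums : List Int) (x : Int), Dom_x_sum_loop nums x → Spec_x_sum_loop nums x (x_sum_loop nums x)

-- ===== LEMMAS AND PROOFS =====

-- common reference value: pick head, then skip x-1 elements, repeat
def strideSum (x : Nat) : List Int → Int
  | [] => 0
  | y :: ys => y + strideSum x (ys.drop (x - 1))
termination_by l => l.length
decreasing_by simp

theorem strideSum_nil (x : Nat) : strideSum x [] = 0 := by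
  rw [strideSum.eq_def]

theorem strideSum_cons (x : Nat) (y : Int) (ys : List Int) :
    strideSum x (y :: ys) = y + strideSum x (ys.drop (x - 1)) := by
  rw [strideSum.eq_def]

-- Python % equals Lean's emod for a positive divisor
theorem pymod_pos (a x : Int) (hx : 0 < x) : PySem.Int.mod a x = a % x := by
  simp [PySem.Int.mod, Int.fmod_eq_emod, hx.le]

-- stepping the remainder: (s+1) % x cycles
theorem emod_succ (s x : Int) (hx : 0 < x) :
    (s + 1) % x = if s % x = x - 1 then 0 else s % x + 1 := by
  have hd := Int.mul_ediv_add_emod s x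
  have hr0 : 0 ≤ s % x := Int.emod_nonneg s (ne_of_gt hx)
  have hr1 : s % x < x := Int.emod_lt_of_pos s hx
  split
  · next h =>
    have hs1 : s + 1 = x * (s / x + 1) := by linarith [hd]
    rw [hs1, Int.mul_emod_right]
  · next h =>
    have hs1 : s + 1 = (s % x + 1) + x * (s / x) := by linarith [hd]
    rw [hs1, Int.add_mul_emod_self_left, Int.emod_eq_of_lt (by omega) (by omega)]

-- A's fold, with the additive accumulator pulled out
theorem foldA_acc (x : Int) : ∀ (l : List (Int × Int)) (acc : Int),
    l.foldl (fun acc p => if PySem.Int.mod (p.1 + 1) x = 0 then acc + p.2 else acc) acc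
      = acc + (l.map (fun p => if PySem.Int.mod (p.1 + 1) x = 0 then p.2 else 0)).sum := by
  intro l
  induction l with
  | nil => simp
  | cons p t ih =>
    intro acc
    simp only [List.foldl_cons, List.map_cons, List.sum_cons, ih]
    split <;> ring

-- A's per-index sum equals strideSum on the dropped list; c counts down to the next pick
theorem enumSum (x : Int) (hx : 0 < x) : ∀ (l : List Int) (s : Int) (c : Nat), 0 ≤ s →
    (c : Int) < x → s % x = x - 1 - c →
    ((PySem.List.enumerate l s).map
        (fun p => if PySem.Int.mod (p.1 + 1) x = 0 then p.2 else 0)).sum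
      = strideSum x.toNat (l.drop c) := by
  intro l
  induction l with
  | nil =>
    intro s c _ _ _
    simp [PySem.List.enumerate, strideSum_nil]
  | cons y ys ih =>
    intro s c hs hc hinv
    rw [PySem.List.enumerate_cons, List.map_cons, List.sum_cons, pymod_pos _ _ hx]
    have hstep := emod_succ s x hx
    cases c with
    | zero =>
      have hz : s % x = x - 1 := by push_cast at hinv; omega
      rw [if_pos hz] at hstep
      rw [if_pos hstep, List.drop_zero, strideSum_cons]
      rw [ih (s + 1) (x.toNat - 1) (by omega) (by omega) (by omega)]
    | succ k =>
      have hknz : s % x ≠ x - 1 := by push_cast at hinv; omega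
      rw [if_neg hknz] at hstep
      have hne : (s + 1) % x ≠ 0 := by push_cast at hinv; omega
      rw [if_neg hne]
      rw [ih (s + 1) k (by omega) (by omega)
            (by omega)]
      simp

-- B's loop equals strideSum on the dropped list (n is fuel bounding the remaining length)
theorem bLoop_eq (l : List Int) (x : Int) (hx : 1 ≤ x) :
    ∀ (n : Nat) (i t : Int), 0 ≤ i → (l.length : Int) ≤ i + n →
    bLoop l x i t = t + strideSum x.toNat (l.drop i.toNat) := by
  intro n
  induction n with
  | zero =>
    intro i t hi hn
    rw [bLoop, dif_neg (by omega), List.drop_eq_nil_of_le (by omega), strideSum_nil]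
    ring
  | succ n ih =>
    intro i t hi hn
    by_cases h : i < (l.length : Int)
    · rw [bLoop, dif_pos h]
      rw [ih (i + max x 1) (t + PySem.List.pyGetD l i 0) (by omega) (by omega)]
      have hmax : max x 1 = x := by omega
      have hidx : i.toNat < l.length := by omega
      have hdrop : l.drop i.toNat = l[i.toNat] :: l.drop (i.toNat + 1) :=
        List.drop_eq_getElem_cons hidx
      rw [hdrop, strideSum_cons]
      have hget : PySem.List.pyGetD l i 0 = l[i.toNat] := by
        rw [PySem.List.pyGetD_of_nonneg l 0 hi]
        simp [List.getD, hidx]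
      have harith : ((l.drop (i.toNat + 1)).drop (x.toNat - 1)) = l.drop (i + max x 1).toNat := by
        rw [List.drop_drop]
        congr 1
        omega
      rw [harith, hget, hmax]
      ring
    · rw [bLoop, dif_neg h, List.drop_eq_nil_of_le (by omega), strideSum_nil]
      ring

-- ===== VERDICT (by name: the statement is the Claim_ definition above) =====
theorem x_sum_loop_spec : Claim_equal_x_sum_loop := by
  intro nums x _
  unfold Spec_x_sum_loop x_sum_loop x_sum_loop_alt
  by_cases h0 : x = 0
  · simp [h0]
  · rw [if_neg h0, if_neg h0]
    set l := if x < 0 then nums.reverse else nums with hl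
    set p := if x < 0 then -x else x with hp
    have hpp : 0 < p := by
      rw [hp]; split <;> omega
    rw [foldA_acc, enumSum p hpp l 0 (p - 1).toNat le_rfl (by omega)
          (by rw [Int.zero_emod]; omega)]
    rw [bLoop_eq l p hpp l.length (p - 1) 0 (by omega) (by omega)]
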